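-- pv_equiv track=rewrite | github.com/Tenrai-chi/test_solution | task3/solution/solution.py | calculate_total_time_in_lesson
-- ===== SOURCE A (Python) =====
-- def calculate_total_time_in_lesson(pupil_merged_intervals: list, tutor_merged_intervals: list) -> int:
--     """ Вычисляет пересечение времени между учителем и учеником.
--         Данные уже чистые (включают в себя скомпилированные временные отрезки только во время урока)
--     """
--
--     total_seconds = 0
--     for outer in range(0, len(pupil_merged_intervals), 2):
--         pupil_entry = pupil_merged_intervals[outer]
--         pupil_exit = pupil_merged_intervals[outer + 1]
--
--         for inner in range(0, len(tutor_merged_intervals), 2):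
--             tutor_entry = tutor_merged_intervals[inner]
--             tutor_exit = tutor_merged_intervals[inner + 1]
--
--             entry_intersection = max(pupil_entry, tutor_entry)
--             exit_intersection = min(pupil_exit, tutor_exit)
--
--             if entry_intersection < exit_intersection:
--                 overlap_time = exit_intersection - entry_intersection
--                 total_seconds += overlap_time
--
--     return total_seconds
-- ===== SOURCE B (Python) =====
-- def _events(xs, dp, dt):
--     """Sweep-line events for the proper (start < end) interval pairs of a flat endpoint list."""
--     ev = []
--     i = 0
--     while i + 1 < len(xs):
--         s, e = xs[i], xs[i + 1]
--         if s < e: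
--             ev.append((s, dp, dt))
--             ev.append((e, -dp, -dt))
--         i += 2
--     return ev
--
--
-- def calculate_total_time_in_lesson(pupil_merged_intervals: list, tutor_merged_intervals: list) -> int:
--     # Sweep line: total pairwise overlap = integral of (#open pupil intervals) * (#open tutor intervals).
--     events = _events(pupil_merged_intervals, 1, 0) + _events(tutor_merged_intervals, 0, 1)
--     events.sort(key=lambda e: e[0])
--     total = 0
--     pupil_open = 0
--     tutor_open = 0
--     prev = 0
--     for x, dp, dt in events:
--         total += pupil_open * tutor_open * (x - prev)
--         pupil_open += dp
--         tutor_open += dt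
--         prev = x
--     return total
-- ===== Notes on version B (the rewrite author's own statement) =====
-- stated objective: faster
-- what changed: B replaces A's all-pairs nested loop with a sweep line: it turns every proper interval into +1/-1 boundary events, sorts them by coordinate, and accumulates (open pupil intervals) * (open tutor intervals) * segment length in one pass; this equals A's pairwise overlap sum on all inputs, merged or not.
import Mathlib
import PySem

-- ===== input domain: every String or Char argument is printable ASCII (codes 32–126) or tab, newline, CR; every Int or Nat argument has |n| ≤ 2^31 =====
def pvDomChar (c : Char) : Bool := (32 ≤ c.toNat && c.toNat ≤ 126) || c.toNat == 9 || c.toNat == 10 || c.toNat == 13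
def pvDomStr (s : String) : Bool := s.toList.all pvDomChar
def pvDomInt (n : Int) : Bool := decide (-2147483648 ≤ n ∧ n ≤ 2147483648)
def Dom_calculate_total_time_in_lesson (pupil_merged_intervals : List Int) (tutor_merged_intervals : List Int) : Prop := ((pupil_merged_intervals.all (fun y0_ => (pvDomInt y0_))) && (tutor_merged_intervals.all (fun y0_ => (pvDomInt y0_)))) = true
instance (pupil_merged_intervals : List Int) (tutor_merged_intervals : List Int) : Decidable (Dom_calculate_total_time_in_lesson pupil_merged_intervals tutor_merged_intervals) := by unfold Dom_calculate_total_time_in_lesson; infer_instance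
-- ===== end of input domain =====

-- B replaces A's all-pairs nested loop with a sweep line over sorted +1/-1 boundary events
-- (objective: faster, O((n+m) log (n+m)) vs O(n*m)); equivalence proved on even-length inputs.

-- ===== PORT A =====
def calculate_total_time_in_lesson (pupil_merged_intervals : List Int) (tutor_merged_intervals : List Int) : Int :=
  (PySem.List.pyRange 0 (pupil_merged_intervals.length : Int) 2).foldl
    (fun total_seconds outer =>
      let pupil_entry := PySem.List.pyGetD pupil_merged_intervals outer 0
      let pupil_exit := PySem.List.pyGetD pupil_merged_intervals (outer + 1) 0
      (PySem.List.pyRange 0 (tutor_merged_intervals.length : Int) 2).foldl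
        (fun total_seconds inner =>
          let tutor_entry := PySem.List.pyGetD tutor_merged_intervals inner 0
          let tutor_exit := PySem.List.pyGetD tutor_merged_intervals (inner + 1) 0
          let entry_intersection := max pupil_entry tutor_entry
          let exit_intersection := min pupil_exit tutor_exit
          if entry_intersection < exit_intersection then
            total_seconds + (exit_intersection - entry_intersection)
          else total_seconds)
        total_seconds)
    0

-- ===== PORT B =====
-- Source B's _events while-loop: consume two endpoints per step; a proper pair (s < e) yields two events
def eventsOf : List Int → Int → Int → List (Int × Int × Int)
  | s :: e :: rest, dp, dt =>
      (if s < e then [(s, dp, dt), (e, -dp, -dt)] else []) ++ eventsOf rest dp dt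
  | _, _, _ => []

-- Source B's final for-loop with its four accumulator variables (total, pupil_open, tutor_open, prev)
def sweep : List (Int × Int × Int) → Int → Int → Int → Int → Int
  | [], total, _, _, _ => total
  | (x, dp, dt) :: rest, total, pupil_open, tutor_open, prev =>
      sweep rest (total + pupil_open * tutor_open * (x - prev)) (pupil_open + dp) (tutor_open + dt) x

def calculate_total_time_in_lesson_alt (pupil_merged_intervals : List Int) (tutor_merged_intervals : List Int) : Int :=
  let events := eventsOf pupil_merged_intervals 1 0 ++ eventsOf tutor_merged_intervals 0 1
  sweep (PySem.List.sorted events (fun e => e.1) false) 0 0 0 0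

-- ===== PRECONDITION & SPEC =====
-- A raises IndexError when the pupil list has odd length, or when the pupil list is nonempty and
-- the tutor list has odd length; Pre_ excludes exactly those inputs.
def Pre_calculate_total_time_in_lesson (pupil_merged_intervals : List Int) (tutor_merged_intervals : List Int) : Prop :=
  pupil_merged_intervals.length % 2 = 0 ∧
    (pupil_merged_intervals = [] ∨ tutor_merged_intervals.length % 2 = 0)
instance (pupil_merged_intervals : List Int) (tutor_merged_intervals : List Int) : Decidable (Pre_calculate_total_time_in_lesson pupil_merged_intervals tutor_merged_intervals) := by unfold Pre_calculate_total_time_in_lesson; infer_instance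

def pvWitness_calculate_total_time_in_lesson : List Int × List Int := ([0, 10], [5, 15])

def Spec_calculate_total_time_in_lesson (pupil_merged_intervals : List Int) (tutor_merged_intervals : List Int) (out : Int) : Prop := out = calculate_total_time_in_lesson_alt pupil_merged_intervals tutor_merged_intervals
instance (pupil_merged_intervals : List Int) (tutor_merged_intervals : List Int) (out : Int) : Decidable (Spec_calculate_total_time_in_lesson pupil_merged_intervals tutor_merged_intervals out) := by unfold Spec_calculate_total_time_in_lesson; infer_instance

-- ===== CLAIM (what is proved, stated in full; the proofs are below) =====
def Claim_equal_calculate_total_time_in_lesson : Prop := ∀ (pupil_merged_intervals : List Int) (tutor_merged_intervals : List Int), Dom_calculate_total_time_in_lesson pupil_merged_intervals tutor_merged_intervals → Pre_calculate_total_time_in_lesson pupil_merged_intervals tutor_merged_intervals → Spec_calculate_total_time_in_lesson pupil_merged_intervals tutor_merged_intervals (calculate_total_time_in_lesson pupil_merged_intervals tutor_merged_intervals)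

-- ===== LEMMAS AND PROOFS =====

-- proof-only helpers -------------------------------------------------------

-- the (s, e) interval pairs A's stride-2 loop reads
def pairsOf : List Int → List (Int × Int)
  | a :: b :: rest => (a, b) :: pairsOf rest
  | _ => []

-- 0/1 indicator of x lying in the half-open interval p
def ind (p : Int × Int) (x : Int) : Int := if p.1 ≤ x ∧ x < p.2 then 1 else 0

-- running pupil/tutor counters after all events with coordinate ≤ x
def pcnt (E : List (Int × Int × Int)) (x : Int) : Int :=
  (E.map (fun e => if e.1 ≤ x then e.2.1 else 0)).sum
def tcnt (E : List (Int × Int × Int)) (x : Int) : Int :=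
  (E.map (fun e => if e.1 ≤ x then e.2.2 else 0)).sum
def pSum (E : List (Int × Int × Int)) : Int := (E.map (fun e => e.2.1)).sum
def tSum (E : List (Int × Int × Int)) : Int := (E.map (fun e => e.2.2)).sum

-- the value of `prev` after the sweep loop
def finPrev : List (Int × Int × Int) → Int → Int
  | [], p => p
  | e :: E, _ => finPrev E e.1

-- window containing every admitted coordinate strictly inside
def wLo : Int := -2147483649
def wHi : Int := 2147483649

-- A-side shape lemmas (stride-2 loop = fold over pairsOf) ------------------

lemma pyRange_two_eq_nil {a b : Int} (h : b ≤ a) : PySem.List.pyRange a b 2 = [] := by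
  rw [PySem.List.pyRange_of_pos a b (by norm_num)]
  simp [show ¬ a < b from by omega]

lemma pyRange_two_cons {a b : Int} (h : a < b) :
    PySem.List.pyRange a b 2 = a :: PySem.List.pyRange (a + 2) b 2 := by
  rw [PySem.List.pyRange_of_pos a b (by norm_num),
      PySem.List.pyRange_of_pos (a + 2) b (by norm_num)]
  by_cases h2 : a + 2 < b
  · rw [if_pos h, if_pos h2,
      show ((b - a + 2 - 1) / 2).toNat = ((b - (a + 2) + 2 - 1) / 2).toNat + 1 from by omega,
      List.range_succ_eq_map]
    simp only [List.map_cons, List.map_map, Nat.cast_zero]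
    refine congrArg₂ List.cons (by ring) ?_
    exact List.map_congr_left (fun k _ => by simp [Function.comp]; ring)
  · rw [if_pos h, if_neg h2, show ((b - a + 2 - 1) / 2).toNat = 1 from by omega]
    simp

lemma pyRange_two_shift (n : Int) :
    PySem.List.pyRange 2 (n + 2) 2 = (PySem.List.pyRange 0 n 2).map (· + 2) := by
  rw [PySem.List.pyRange_of_pos 2 (n + 2) (by norm_num),
      PySem.List.pyRange_of_pos 0 n (by norm_num)]
  simp only [show ((2 : Int) < n + 2) ↔ 0 < n from by omega]
  by_cases h : 0 < n
  · rw [if_pos h, if_pos h, show (n + 2 - 2 + 2 - 1) = n + 2 - 1 from by ring,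
      show (n - 0 + 2 - 1) = n + 2 - 1 from by ring, List.map_map]
    exact List.map_congr_left (fun k _ => by simp [Function.comp]; ring)
  · simp [if_neg h]

lemma pyGetD_cons_add (x : Int) (xs : List Int) (i : Int) (h : 0 ≤ i) :
    PySem.List.pyGetD (x :: xs) (i + 1) 0 = PySem.List.pyGetD xs i 0 := by
  obtain ⟨k, rfl⟩ := Int.eq_ofNat_of_zero_le h
  rw [show ((k : Int) + 1) = ((k + 1 : Nat) : Int) from by push_cast; ring,
    PySem.List.pyGetD_natCast, PySem.List.pyGetD_natCast, List.getD_cons_succ]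

lemma stride2_foldl (f : Int → Int → Int → Int) :
    ∀ (xs : List Int), xs.length % 2 = 0 → ∀ (acc : Int),
      (PySem.List.pyRange 0 (xs.length : Int) 2).foldl
        (fun a i => f a (PySem.List.pyGetD xs i 0) (PySem.List.pyGetD xs (i + 1) 0)) acc
      = (pairsOf xs).foldl (fun a p => f a p.1 p.2) acc := by
  intro xs
  induction xs using pairsOf.induct with
  | case1 a b rest ih =>
    intro h acc
    simp only [List.length_cons] at h ⊢
    have hlen : ((rest.length + 1 + 1 : Nat) : Int) = (rest.length : Int) + 2 := by push_cast; ring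
    rw [hlen, pyRange_two_cons (by positivity), List.foldl_cons,
      show ((0 : Int) + 2) = 2 from by ring, pyRange_two_shift, List.foldl_map]
    have hget : ∀ (acc' : Int), ∀ i ∈ PySem.List.pyRange 0 (rest.length : Int) 2,
        f acc' (PySem.List.pyGetD (a :: b :: rest) (i + 2) 0)
          (PySem.List.pyGetD (a :: b :: rest) (i + 2 + 1) 0)
        = f acc' (PySem.List.pyGetD rest i 0) (PySem.List.pyGetD rest (i + 1) 0) := by
      intro acc' i hi
      have h0 : 0 ≤ i := ((PySem.List.mem_pyRange_iff_of_pos (by norm_num) i).1 hi).1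
      rw [show i + 2 = (i + 1) + 1 from by ring, pyGetD_cons_add a _ _ (by omega),
        pyGetD_cons_add b _ _ h0, show (i + 1) + 1 + 1 = ((i + 1) + 1) + 1 from rfl,
        pyGetD_cons_add a _ _ (by omega), pyGetD_cons_add b _ _ (by omega)]
    rw [PySem.List.foldl_congr_mem _ _ _ _ hget]
    have h0 : PySem.List.pyGetD (a :: b :: rest) 0 0 = a := PySem.List.pyGetD_zero_cons a _ 0
    have h1 : PySem.List.pyGetD (a :: b :: rest) (0 + 1) 0 = b := by
      rw [pyGetD_cons_add a _ 0 le_rfl]; exact PySem.List.pyGetD_zero_cons b _ 0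
    rw [h0, h1, ih (by omega)]
    simp [pairsOf]
  | case2 xs hshape =>
    intro h acc
    rcases xs with _ | ⟨x, _ | ⟨y, rest⟩⟩
    · simp [pairsOf, pyRange_two_eq_nil (le_refl 0)]
    · simp at h
    · exact absurd rfl (fun hh => hshape x y rest hh)

-- bounds plumbing ----------------------------------------------------------

lemma mem_pairsOf_mem : ∀ (xs : List Int) (p : Int × Int), p ∈ pairsOf xs → p.1 ∈ xs ∧ p.2 ∈ xs := by
  intro xs
  induction xs using pairsOf.induct with
  | case1 a b rest ih =>
    intro p hp
    rcases (by simpa [pairsOf] using hp : p = (a, b) ∨ p ∈ pairsOf rest) with rfl | hp'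
    · simp
    · have := ih p hp'; simp [this.1, this.2]
  | case2 xs hshape =>
    intro p hp
    rcases xs with _ | ⟨x, _ | ⟨y, rest⟩⟩ <;> simp [pairsOf] at hp
    exact absurd rfl (fun hh => hshape x y rest hh)

lemma mem_eventsOf_mem : ∀ (xs : List Int) (dp dt : Int) (e : Int × Int × Int),
    e ∈ eventsOf xs dp dt → e.1 ∈ xs := by
  intro xs dp dt
  induction xs using pairsOf.induct with
  | case1 a b rest ih =>
    intro e he
    simp only [eventsOf, List.mem_append] at he
    rcases he with he | he
    · split_ifs at he with hab
      · rcases (by simpa using he : e = (a, dp, dt) ∨ e = (b, -dp, -dt)) with rfl | rfl <;> simp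
      · simp at he
    · simpa using Or.inr (Or.inr (ih e he))
  | case2 xs hshape =>
    intro e he
    rcases xs with _ | ⟨x, _ | ⟨y, rest⟩⟩ <;> simp [eventsOf] at he
    exact absurd rfl (fun hh => hshape x y rest hh)

lemma dom_bound {xs : List Int} (h : xs.all (fun y => pvDomInt y) = true) :
    ∀ y ∈ xs, -2147483648 ≤ y ∧ y ≤ 2147483648 := by
  intro y hy
  have := List.all_eq_true.1 h y hy
  simpa [pvDomInt] using this

-- counters of the event lists ----------------------------------------------

lemma pcnt_append (E F : List (Int × Int × Int)) (x : Int) :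
    pcnt (E ++ F) x = pcnt E x + pcnt F x := by simp [pcnt]
lemma tcnt_append (E F : List (Int × Int × Int)) (x : Int) :
    tcnt (E ++ F) x = tcnt E x + tcnt F x := by simp [tcnt]

lemma pcnt_eventsOf (xs : List Int) (dp dt x : Int) :
    pcnt (eventsOf xs dp dt) x = dp * ((pairsOf xs).map (fun p => ind p x)).sum := by
  induction xs using pairsOf.induct with
  | case1 a b rest ih =>
    simp only [eventsOf, pairsOf, pcnt_append, List.map_cons, List.sum_cons, ih]
    have : pcnt (if a < b then [(a, dp, dt), (b, -dp, -dt)] else []) x = dp * ind (a, b) x := by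
      split_ifs with hab <;> simp only [pcnt, List.map, List.sum_cons, List.sum_nil, ind] <;>
        split_ifs <;> simp_all <;> omega
    rw [this]; ring
  | case2 xs hshape =>
    rcases xs with _ | ⟨x', _ | ⟨y, rest⟩⟩
    · simp [eventsOf, pairsOf, pcnt]
    · simp [eventsOf, pairsOf, pcnt]
    · exact absurd rfl (fun hh => hshape x' y rest hh)

lemma tcnt_eventsOf (xs : List Int) (dp dt x : Int) :
    tcnt (eventsOf xs dp dt) x = dt * ((pairsOf xs).map (fun p => ind p x)).sum := by
  induction xs using pairsOf.induct with
  | case1 a b rest ih =>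
    simp only [eventsOf, pairsOf, tcnt_append, List.map_cons, List.sum_cons, ih]
    have : tcnt (if a < b then [(a, dp, dt), (b, -dp, -dt)] else []) x = dt * ind (a, b) x := by
      split_ifs with hab <;> simp only [tcnt, List.map, List.sum_cons, List.sum_nil, ind] <;>
        split_ifs <;> simp_all <;> omega
    rw [this]; ring
  | case2 xs hshape =>
    rcases xs with _ | ⟨x', _ | ⟨y, rest⟩⟩
    · simp [eventsOf, tcnt, pairsOf]
    · simp [eventsOf, tcnt, pairsOf]
    · exact absurd rfl (fun hh => hshape x' y rest hh)

lemma pSum_eventsOf (xs : List Int) (dp dt : Int) : pSum (eventsOf xs dp dt) = 0 := by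
  induction xs using pairsOf.induct with
  | case1 a b rest ih =>
    simp only [eventsOf, pSum, List.map_append, List.sum_append]
    have : ((if a < b then [(a, dp, dt), (b, -dp, -dt)] else []).map (fun e => e.2.1)).sum = 0 := by
      split_ifs <;> simp
    rw [this]; simpa [pSum] using ih
  | case2 xs hshape =>
    rcases xs with _ | ⟨x', _ | ⟨y, rest⟩⟩
    · simp [eventsOf, pSum]
    · simp [eventsOf, pSum]
    · exact absurd rfl (fun hh => hshape x' y rest hh)

lemma pcnt_perm {E F : List (Int × Int × Int)} (h : E.Perm F) (x : Int) : pcnt E x = pcnt F x :=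
  (h.map _).sum_eq
lemma tcnt_perm {E F : List (Int × Int × Int)} (h : E.Perm F) (x : Int) : tcnt E x = tcnt F x :=
  (h.map _).sum_eq
lemma pSum_perm {E F : List (Int × Int × Int)} (h : E.Perm F) : pSum E = pSum F :=
  (h.map _).sum_eq
lemma tSum_perm {E F : List (Int × Int × Int)} (h : E.Perm F) : tSum E = tSum F :=
  (h.map _).sum_eq

lemma pcnt_eq_zero_of_lt {E : List (Int × Int × Int)} {x y : Int}
    (hall : ∀ e ∈ E, x ≤ e.1) (hy : y < x) : pcnt E y = 0 := by
  refine List.sum_eq_zero ?_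
  intro z hz
  obtain ⟨e, he, rfl⟩ := List.mem_map.1 hz
  have := hall e he
  simp [show ¬ e.1 ≤ y from by omega]

lemma tcnt_eq_zero_of_lt {E : List (Int × Int × Int)} {x y : Int}
    (hall : ∀ e ∈ E, x ≤ e.1) (hy : y < x) : tcnt E y = 0 := by
  refine List.sum_eq_zero ?_
  intro z hz
  obtain ⟨e, he, rfl⟩ := List.mem_map.1 hz
  have := hall e he
  simp [show ¬ e.1 ≤ y from by omega]

-- the sweep-loop invariant --------------------------------------------------

lemma sweep_eq (R : Int) : ∀ (E : List (Int × Int × Int)),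
    E.Pairwise (fun a b => a.1 ≤ b.1) →
    ∀ (total po tu prev : Int), prev ≤ R → (∀ e ∈ E, prev ≤ e.1 ∧ e.1 ≤ R) →
    sweep E total po tu prev
      = total + (∑ x ∈ Finset.Ico prev R, (po + pcnt E x) * (tu + tcnt E x))
        - (po + pSum E) * (tu + tSum E) * (R - finPrev E prev) := by
  intro E
  induction E with
  | nil =>
    intro _ total po tu prev hpR _
    simp only [sweep, pcnt, tcnt, pSum, tSum, finPrev, List.map_nil, List.sum_nil,
      add_zero, Finset.sum_const, Int.card_Ico, nsmul_eq_mul]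
    rw [Int.toNat_of_nonneg (by omega)]
    ring
  | cons e E' ih =>
    rcases e with ⟨x, dp, dt⟩
    intro hpw total po tu prev hpR hall
    have hx : prev ≤ x ∧ x ≤ R := hall (x, dp, dt) List.mem_cons_self
    have hxall : ∀ e ∈ E', x ≤ e.1 := fun e he => (List.pairwise_cons.1 hpw).1 e he
    have hall' : ∀ e ∈ E', x ≤ e.1 ∧ e.1 ≤ R :=
      fun e he => ⟨hxall e he, (hall e (by simp [he])).2⟩
    rw [show sweep ((x, dp, dt) :: E') total po tu prev
        = sweep E' (total + po * tu * (x - prev)) (po + dp) (tu + dt) x from rfl,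
      ih (List.pairwise_cons.1 hpw).2 _ _ _ _ hx.2 hall']
    have hsplit : (∑ y ∈ Finset.Ico prev R, (po + pcnt ((x, dp, dt) :: E') y) * (tu + tcnt ((x, dp, dt) :: E') y))
        = (∑ y ∈ Finset.Ico prev x, (po + pcnt ((x, dp, dt) :: E') y) * (tu + tcnt ((x, dp, dt) :: E') y))
          + (∑ y ∈ Finset.Ico x R, (po + pcnt ((x, dp, dt) :: E') y) * (tu + tcnt ((x, dp, dt) :: E') y)) :=
      by
        rw [← Finset.Ico_union_Ico_eq_Ico hx.1 hx.2,
          Finset.sum_union (Finset.Ico_disjoint_Ico_consecutive prev x R)]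
    have hlow : (∑ y ∈ Finset.Ico prev x, (po + pcnt ((x, dp, dt) :: E') y) * (tu + tcnt ((x, dp, dt) :: E') y))
        = po * tu * (x - prev) := by
      have hterm : ∀ y ∈ Finset.Ico prev x,
          (po + pcnt ((x, dp, dt) :: E') y) * (tu + tcnt ((x, dp, dt) :: E') y) = po * tu := by
        intro y hy
        have hy' := Finset.mem_Ico.1 hy
        rw [show pcnt ((x, dp, dt) :: E') y = (if x ≤ y then dp else 0) + pcnt E' y from by
            simp [pcnt],
          show tcnt ((x, dp, dt) :: E') y = (if x ≤ y then dt else 0) + tcnt E' y from by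
            simp [tcnt],
          pcnt_eq_zero_of_lt hxall hy'.2, tcnt_eq_zero_of_lt hxall hy'.2,
          if_neg (by omega), if_neg (by omega)]
        ring
      rw [Finset.sum_congr rfl hterm, Finset.sum_const, Int.card_Ico, nsmul_eq_mul,
        Int.toNat_of_nonneg (by omega)]
      ring
    have hhigh : (∑ y ∈ Finset.Ico x R, (po + pcnt ((x, dp, dt) :: E') y) * (tu + tcnt ((x, dp, dt) :: E') y))
        = (∑ y ∈ Finset.Ico x R, (po + dp + pcnt E' y) * (tu + dt + tcnt E' y)) := by
      refine Finset.sum_congr rfl (fun y hy => ?_)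
      have hy' := Finset.mem_Ico.1 hy
      rw [show pcnt ((x, dp, dt) :: E') y = (if x ≤ y then dp else 0) + pcnt E' y from by
          simp [pcnt],
        show tcnt ((x, dp, dt) :: E') y = (if x ≤ y then dt else 0) + tcnt E' y from by
          simp [tcnt],
        if_pos hy'.1, if_pos hy'.1]
      ring_nf
    rw [hsplit, hlow, hhigh,
      show pSum ((x, dp, dt) :: E') = dp + pSum E' from by simp [pSum],
      show tSum ((x, dp, dt) :: E') = dt + tSum E' from by simp [tSum],
      show finPrev ((x, dp, dt) :: E') prev = finPrev E' x from rfl]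
    ring

lemma sweep_prev_irrel (E : List (Int × Int × Int)) (a b : Int) :
    sweep E 0 0 0 a = sweep E 0 0 0 b := by
  cases E with
  | nil => rfl
  | cons e rest => rcases e with ⟨x, dp, dt⟩; simp [sweep]

-- list-sum / finset-sum interchange ----------------------------------------

lemma listsum_finsetsum {α : Type} (l : List α) (s : Finset Int) (f : α → Int → Int) :
    (l.map (fun p => ∑ x ∈ s, f p x)).sum = ∑ x ∈ s, (l.map (fun p => f p x)).sum := by
  induction l with
  | nil => simp
  | cons p l ih => simp [ih, Finset.sum_add_distrib]

-- one pair against one pair: overlap = window count of common points --------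

lemma overlap_eq_card (p t : Int × Int)
    (hp1 : wLo < p.1) (hp2 : p.2 < wHi) (ht1 : wLo < t.1) (ht2 : t.2 < wHi) :
    max 0 (min p.2 t.2 - max p.1 t.1) = ∑ x ∈ Finset.Ico wLo wHi, ind p x * ind t x := by
  have h1 : ∀ x, ind p x * ind t x
      = if x ∈ Finset.Ico (max p.1 t.1) (min p.2 t.2) then (1 : Int) else 0 := by
    intro x
    simp only [ind, Finset.mem_Ico]
    split_ifs <;> first | rfl | omega
  rw [Finset.sum_congr rfl (fun x _ => h1 x), Finset.sum_ite_mem,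
    Finset.Ico_inter_Ico, Finset.sum_const, Int.card_Ico, nsmul_eq_mul, mul_one,
    show max wLo (max p.1 t.1) = max p.1 t.1 from by omega,
    show min wHi (min p.2 t.2) = min p.2 t.2 from by omega]
  omega

-- B-side: the sweep result as a window sum of counter products ------------

lemma alt_eq_sum (P T : List Int)
    (hPb : ∀ y ∈ P, -2147483648 ≤ y ∧ y ≤ 2147483648)
    (hTb : ∀ y ∈ T, -2147483648 ≤ y ∧ y ≤ 2147483648) :
    calculate_total_time_in_lesson_alt P T
      = ∑ x ∈ Finset.Ico wLo wHi,
          ((pairsOf P).map (fun p => ind p x)).sum * ((pairsOf T).map (fun t => ind t x)).sum := by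
  unfold calculate_total_time_in_lesson_alt
  have hperm : (PySem.List.sorted (eventsOf P 1 0 ++ eventsOf T 0 1) (fun e => e.1) false).Perm
      (eventsOf P 1 0 ++ eventsOf T 0 1) := PySem.List.sorted_perm _ _ _
  have hbounds : ∀ e ∈ PySem.List.sorted (eventsOf P 1 0 ++ eventsOf T 0 1) (fun e => e.1) false,
      wLo ≤ e.1 ∧ e.1 ≤ wHi := by
    intro e he
    have he' := hperm.mem_iff.1 he
    rcases List.mem_append.1 he' with h | h
    · have := hPb _ (mem_eventsOf_mem _ _ _ _ h); unfold wLo wHi; omega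
    · have := hTb _ (mem_eventsOf_mem _ _ _ _ h); unfold wLo wHi; omega
  rw [sweep_prev_irrel _ 0 wLo,
    sweep_eq wHi _ (PySem.List.sorted_pairwise _ _) 0 0 0 wLo (by unfold wLo wHi; omega) hbounds,
    pSum_perm hperm, tSum_perm hperm,
    show pSum (eventsOf P 1 0 ++ eventsOf T 0 1) = 0 from by
      have h1 := pSum_eventsOf P 1 0
      have h2 := pSum_eventsOf T 0 1
      simp [pSum] at *; omega]
  have hcong : ∀ x ∈ Finset.Ico wLo wHi,
      (0 + pcnt (PySem.List.sorted (eventsOf P 1 0 ++ eventsOf T 0 1) (fun e => e.1) false) x)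
        * (0 + tcnt (PySem.List.sorted (eventsOf P 1 0 ++ eventsOf T 0 1) (fun e => e.1) false) x)
      = ((pairsOf P).map (fun p => ind p x)).sum * ((pairsOf T).map (fun t => ind t x)).sum := by
    intro x _
    rw [pcnt_perm hperm, tcnt_perm hperm, pcnt_append, tcnt_append,
      pcnt_eventsOf, pcnt_eventsOf, tcnt_eventsOf, tcnt_eventsOf]
    ring
  rw [Finset.sum_congr rfl hcong]
  ring

-- A-side: the nested stride-2 loop as the same window sum -------------------

lemma a_eq_pairs (P T : List Int) (hP : P.length % 2 = 0) (hT : T.length % 2 = 0) :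
    calculate_total_time_in_lesson P T
      = ((pairsOf P).map (fun p =>
          ((pairsOf T).map (fun t => max 0 (min p.2 t.2 - max p.1 t.1))).sum)).sum := by
  unfold calculate_total_time_in_lesson
  rw [stride2_foldl (fun a ps pe =>
    (PySem.List.pyRange 0 (T.length : Int) 2).foldl
      (fun total inner =>
        let tutor_entry := PySem.List.pyGetD T inner 0
        let tutor_exit := PySem.List.pyGetD T (inner + 1) 0
        if max ps tutor_entry < min pe tutor_exit then
          total + (min pe tutor_exit - max ps tutor_entry)
        else total)
      a) P hP]
  have hinner : ∀ (a : Int), ∀ p ∈ pairsOf P,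
      (PySem.List.pyRange 0 (T.length : Int) 2).foldl
        (fun total inner =>
          let tutor_entry := PySem.List.pyGetD T inner 0
          let tutor_exit := PySem.List.pyGetD T (inner + 1) 0
          if max p.1 tutor_entry < min p.2 tutor_exit then
            total + (min p.2 tutor_exit - max p.1 tutor_entry)
          else total)
        a
      = a + ((pairsOf T).map (fun t => max 0 (min p.2 t.2 - max p.1 t.1))).sum := by
    intro a p _
    rw [stride2_foldl (fun b ts te =>
      if max p.1 ts < min p.2 te then b + (min p.2 te - max p.1 ts) else b) T hT,
      PySem.List.foldl_congr_mem _ _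
        (fun b t => b + max 0 (min p.2 t.2 - max p.1 t.1)) _
        (fun b t _ => by dsimp only; split_ifs <;> omega)]
    exact PySem.List.foldl_add _ _ a
  rw [PySem.List.foldl_congr_mem _ _ _ _ hinner]
  exact (PySem.List.foldl_add _ _ 0).trans (zero_add _)

-- ===== VERDICT (by name: the statement is the Claim_ definition above) =====
theorem calculate_total_time_in_lesson_spec : Claim_equal_calculate_total_time_in_lesson := by
  intro pupil tutor hdom hpre
  obtain ⟨hp, ht⟩ := hpre
  unfold Dom_calculate_total_time_in_lesson at hdom
  rw [Bool.and_eq_true] at hdom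
  have hPb := dom_bound hdom.1
  have hTb := dom_bound hdom.2
  unfold Spec_calculate_total_time_in_lesson
  rw [alt_eq_sum pupil tutor hPb hTb]
  rcases ht with rfl | ht
  · -- empty pupil list: A's outer loop runs zero times; the window sum is identically 0
    unfold calculate_total_time_in_lesson
    simp [pyRange_two_eq_nil (le_refl 0), pairsOf]
  · rw [a_eq_pairs pupil tutor hp ht]
    have hstep1 : ∀ p ∈ pairsOf pupil,
        ((pairsOf tutor).map (fun t => max 0 (min p.2 t.2 - max p.1 t.1))).sum
        = ∑ x ∈ Finset.Ico wLo wHi, ind p x * ((pairsOf tutor).map (fun t => ind t x)).sum := by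
      intro p hpmem
      have hpB := mem_pairsOf_mem pupil p hpmem
      have hpb1 := hPb _ hpB.1
      have hpb2 := hPb _ hpB.2
      rw [List.map_congr_left (fun t htmem => by
        have htB := mem_pairsOf_mem tutor t htmem
        have htb1 := hTb _ htB.1
        have htb2 := hTb _ htB.2
        exact overlap_eq_card p t (by unfold wLo; omega) (by unfold wHi; omega)
          (by unfold wLo; omega) (by unfold wHi; omega)),
        listsum_finsetsum]
      exact Finset.sum_congr rfl (fun x _ => List.sum_map_mul_left _ _ _)
    rw [List.map_congr_left hstep1, listsum_finsetsum]
    exact Finset.sum_congr rfl (fun x _ => List.sum_map_mul_right _ _ _)
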